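-- pv_equiv track=rewrite | github.com/jvanijcken/simpleEngine | src/python/render_functions.py | place_in_grid
-- ===== SOURCE A (Python) =====
-- def place_in_grid(x, y, width, height, pad, w_el, h_el):
--     x_end = x + width
--     y_end = y - height
--
--     y += height
--     x_s = x + 0
--
--     result = []
--     for i in range(20):
--         x = x_s + 0
--
--         for j in range(20):
--             if (y - h_el - pad) < y_end:
--                 break
--             if (x + w_el + pad) > x_end:
--                 break
--
--             result.append((
--                 x + pad,
--                 y - h_el - pad,
--                 w_el,
--                 h_el
--             ))
--             x += pad
--             x += w_el
--
--         y -= pad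
--         y -= h_el
--
--     return result
-- ===== SOURCE B (Python) =====
-- def place_in_grid(x, y, width, height, pad, w_el, h_el):
--     x_end = x + width
--     y_end = y - height
--
--     # column x-values: same repeated additions as the original, capped at 20
--     xs = []
--     xv = x
--     while len(xs) < 20 and xv + w_el + pad <= x_end:
--         xs.append(xv)
--         xv += pad
--         xv += w_el
--
--     # row y-values: 20 candidate rows, keep only the valid ones
--     ys = []
--     yv = y + height
--     for _ in range(20):
--         if yv - h_el - pad >= y_end:
--             ys.append(yv)
--         yv -= pad
--         yv -= h_el
--
--     return [(xv + pad, yv - h_el - pad, w_el, h_el) for yv in ys for xv in xs]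
-- ===== Notes on version B (the rewrite author's own statement) =====
-- stated objective: alternative
-- what changed: Replaces the interleaved 20x20 nested loop (with per-row break logic) by two independent 1D passes that precompute the column x-values and the valid row y-values, then emits their cartesian product with a comprehension.
import Mathlib
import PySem

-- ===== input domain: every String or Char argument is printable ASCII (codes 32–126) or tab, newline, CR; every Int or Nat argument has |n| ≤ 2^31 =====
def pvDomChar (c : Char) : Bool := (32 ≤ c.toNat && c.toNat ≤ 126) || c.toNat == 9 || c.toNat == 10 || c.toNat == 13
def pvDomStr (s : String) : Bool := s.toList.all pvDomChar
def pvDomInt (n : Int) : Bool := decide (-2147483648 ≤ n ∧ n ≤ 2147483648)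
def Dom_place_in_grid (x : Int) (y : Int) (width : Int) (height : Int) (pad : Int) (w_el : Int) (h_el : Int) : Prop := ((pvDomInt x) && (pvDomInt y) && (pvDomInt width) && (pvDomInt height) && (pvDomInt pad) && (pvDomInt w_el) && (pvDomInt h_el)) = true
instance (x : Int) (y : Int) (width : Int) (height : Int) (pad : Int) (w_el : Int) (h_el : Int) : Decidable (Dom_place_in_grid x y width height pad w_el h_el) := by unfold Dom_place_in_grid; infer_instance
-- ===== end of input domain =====

-- B replaces the interleaved nested loop by two independent 1D passes (columns, valid rows) plus a product; same return value, no speed claim.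
-- ===== PORT A =====
-- inner 'for j in range(20)' loop of A, with both breaks; returns the accumulated result list
def pvInnerA (x_end y_end pad w_el h_el y : Int) : Nat → Int → List (Int × Int × Int × Int) → List (Int × Int × Int × Int)
  | 0, _, res => res
  | j+1, x, res =>
    if y - h_el - pad < y_end then res
    else if x + w_el + pad > x_end then res
    else pvInnerA x_end y_end pad w_el h_el y j (x + pad + w_el) (res ++ [(x + pad, y - h_el - pad, w_el, h_el)])

-- outer 'for i in range(20)' loop of A
def pvOuterA (x_end y_end pad w_el h_el x_s : Int) : Nat → Int → List (Int × Int × Int × Int) → List (Int × Int × Int × Int)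
  | 0, _, res => res
  | i+1, y, res => pvOuterA x_end y_end pad w_el h_el x_s i (y - pad - h_el) (pvInnerA x_end y_end pad w_el h_el y 20 x_s res)

def place_in_grid (x : Int) (y : Int) (width : Int) (height : Int) (pad : Int) (w_el : Int) (h_el : Int) : List (Int × Int × Int × Int) :=
  let x_end := x + width
  let y_end := y - height
  let y' := y + height
  let x_s := x + 0
  pvOuterA x_end y_end pad w_el h_el x_s 20 y' []

-- ===== PORT B =====
-- column x-values: 'while len(xs) < 20 and xv + w_el + pad <= x_end'
def pvColsB (x_end pad w_el : Int) : Nat → Int → List Int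
  | 0, _ => []
  | n+1, xv => if xv + w_el + pad ≤ x_end then xv :: pvColsB x_end pad w_el n (xv + pad + w_el) else []

-- row y-values: 20 candidates, keep the valid ones
def pvRowsB (y_end pad h_el : Int) : Nat → Int → List Int
  | 0, _ => []
  | n+1, yv => (if yv - h_el - pad ≥ y_end then [yv] else []) ++ pvRowsB y_end pad h_el n (yv - pad - h_el)

def place_in_grid_alt (x : Int) (y : Int) (width : Int) (height : Int) (pad : Int) (w_el : Int) (h_el : Int) : List (Int × Int × Int × Int) :=
  let x_end := x + width
  let y_end := y - height
  let xs := pvColsB x_end pad w_el 20 x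
  let ys := pvRowsB y_end pad h_el 20 (y + height)
  ys.flatMap (fun yv => xs.map (fun xv => (xv + pad, yv - h_el - pad, w_el, h_el)))

-- ===== PRECONDITION & SPEC =====
def Spec_place_in_grid (x : Int) (y : Int) (width : Int) (height : Int) (pad : Int) (w_el : Int) (h_el : Int) (out : List (Int × Int × Int × Int)) : Prop := out = place_in_grid_alt x y width height pad w_el h_el
instance (x : Int) (y : Int) (width : Int) (height : Int) (pad : Int) (w_el : Int) (h_el : Int) (out : List (Int × Int × Int × Int)) : Decidable (Spec_place_in_grid x y width height pad w_el h_el out) := by unfold Spec_place_in_grid; infer_instance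

-- ===== CLAIM =====
def Claim_equal_place_in_grid : Prop := ∀ (x : Int) (y : Int) (width : Int) (height : Int) (pad : Int) (w_el : Int) (h_el : Int), Dom_place_in_grid x y width height pad w_el h_el → Spec_place_in_grid x y width height pad w_el h_el (place_in_grid x y width height pad w_el h_el)

-- ===== LEMMAS AND PROOFS =====
-- A's inner loop appends one valid row: the y-test is constant over the row, so it yields
-- either nothing or the mapped column list.
theorem innerA_eq (x_end y_end pad w_el h_el y : Int) :
    ∀ (n : Nat) (x : Int) (res : List (Int × Int × Int × Int)),
      pvInnerA x_end y_end pad w_el h_el y n x res =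
        res ++ (if y - h_el - pad < y_end then []
                else (pvColsB x_end pad w_el n x).map
                  (fun xv => (xv + pad, y - h_el - pad, w_el, h_el))) := by
  intro n
  induction n with
  | zero => intro x res; simp [pvInnerA, pvColsB]
  | succ n ih =>
    intro x res
    by_cases hy : y - h_el - pad < y_end
    · simp [pvInnerA, hy]
    · by_cases hx : x + w_el + pad > x_end
      · have hx' : ¬ (x + w_el + pad ≤ x_end) := by omega
        simp [pvInnerA, hy, hx, pvColsB, hx']
      · have hx' : x + w_el + pad ≤ x_end := by omega
        simp [pvInnerA, hy, hx, pvColsB, hx', ih]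

-- A's outer loop equals the flatMap over the valid rows.
theorem outerA_eq (x_end y_end pad w_el h_el x_s : Int) :
    ∀ (n : Nat) (y : Int) (res : List (Int × Int × Int × Int)),
      pvOuterA x_end y_end pad w_el h_el x_s n y res =
        res ++ (pvRowsB y_end pad h_el n y).flatMap
          (fun yv => (pvColsB x_end pad w_el 20 x_s).map
            (fun xv => (xv + pad, yv - h_el - pad, w_el, h_el))) := by
  intro n
  induction n with
  | zero => intro y res; simp [pvOuterA, pvRowsB]
  | succ n ih =>
    intro y res
    by_cases hy : y - h_el - pad ≥ y_end
    · have hy' : ¬ (y - h_el - pad < y_end) := by omega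
      simp [pvOuterA, pvRowsB, hy, ih, innerA_eq, hy', List.append_assoc]
    · have hy' : y - h_el - pad < y_end := by omega
      simp [pvOuterA, pvRowsB, hy, ih, innerA_eq, hy']

-- ===== VERDICT =====
theorem place_in_grid_spec : Claim_equal_place_in_grid := by
  intro x y width height pad w_el h_el _
  unfold Spec_place_in_grid place_in_grid place_in_grid_alt
  simp only [outerA_eq, List.nil_append, Int.add_zero]
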